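-- pv_equiv track=rewrite | github.com/ThiagoDonato/Cominatorial_Research | backend/app.py | count_elements_to_right
-- ===== SOURCE A (Python) =====
-- def count_elements_to_right(l1, l2):
--     l1_set = set(l1)
--     right_count = {x: 0 for x in l1_set}
--     count = 0
--
--     # Traverse l2 from right to left
--     for i in reversed(range(len(l2))):
--         if l2[i] in l1_set:
--             # If l2[i] is in l1, store the current count for that element
--             right_count[l2[i]] = count
--         elif l2[i] not in l1_set:
--             # If l2[i] is not in l1, increment count
--             count += 1
--
--     # Sum the right counts for each element in l1
--     return sum(right_count[x] for x in l1_set)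
-- ===== SOURCE B (Python) =====
-- def count_elements_to_right(l1, l2):
--     l1_set = set(l1)
--     total = sum(1 for x in l2 if x not in l1_set)
--     prefix = 0
--     res = 0
--     seen = set()
--     for x in l2:
--         if x in l1_set:
--             if x not in seen:
--                 seen.add(x)
--                 res += total - prefix
--         else:
--             prefix += 1
--     return res
-- ===== Notes on version B (the rewrite author's own statement) =====
-- stated objective: alternative
-- what changed: Replaces A's right-to-left index loop that overwrites per-element suffix counts in a dict and sums them, by a single forward pass keeping a running prefix count of non-l1 elements and a 'seen' set, adding total-minus-prefix at each l1 element's first occurrence.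
import Mathlib
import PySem

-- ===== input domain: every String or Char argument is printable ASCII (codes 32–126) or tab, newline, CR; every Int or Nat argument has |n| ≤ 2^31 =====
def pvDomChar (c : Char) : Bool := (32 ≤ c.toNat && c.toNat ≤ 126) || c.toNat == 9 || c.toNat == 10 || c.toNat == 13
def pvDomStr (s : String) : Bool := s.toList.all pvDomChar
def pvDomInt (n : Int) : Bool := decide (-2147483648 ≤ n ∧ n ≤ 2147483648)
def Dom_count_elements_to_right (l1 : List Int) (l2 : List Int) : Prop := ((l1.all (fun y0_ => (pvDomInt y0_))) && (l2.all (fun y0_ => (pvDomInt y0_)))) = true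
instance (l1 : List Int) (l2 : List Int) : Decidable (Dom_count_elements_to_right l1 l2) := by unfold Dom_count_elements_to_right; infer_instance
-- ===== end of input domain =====

-- B replaces A's right-to-left suffix-overwrite dict pass by a forward pass using total-minus-prefix
-- at first occurrences (an alternative decomposition of the same cost; return value only).

-- ===== PORT A =====
-- transliteration of A: dict initialised to 0 on set(l1); right-to-left loop over the indices of l2
-- (l2[i] is evaluated where the Python writes it; the index is always in range, so pyGetD 0 is exact);
-- final sum over the set (order-independent: a sum of Ints).
def count_elements_to_right (l1 : List Int) (l2 : List Int) : Int :=
  let l1_set : PySem.Set Int := PySem.Set.ofList l1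
  let right_count : PySem.Dict Int Int :=
    l1_set.foldl (fun d x => d.insert x 0) PySem.Dict.empty
  let st : PySem.Dict Int Int × Int :=
    ((PySem.List.pyRange 0 (l2.length : Int) 1).reverse).foldl
      (fun st i =>
        if PySem.Set.contains l1_set (PySem.List.pyGetD l2 i 0) then
          (st.1.insert (PySem.List.pyGetD l2 i 0) st.2, st.2)
        else if !(PySem.Set.contains l1_set (PySem.List.pyGetD l2 i 0)) then
          (st.1, st.2 + 1)
        else st)
      (right_count, 0)
  (l1_set.map (fun x => st.1.getD x 0)).sum

-- ===== PORT B =====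
-- transliteration of Source B: total of non-l1 elements, then one forward pass with state (prefix, seen, res).
def count_elements_to_right_alt (l1 : List Int) (l2 : List Int) : Int :=
  let l1_set : PySem.Set Int := PySem.Set.ofList l1
  let total : Int := l2.foldl (fun acc x => if PySem.Set.contains l1_set x then acc else acc + 1) 0
  let st : Int × PySem.Set Int × Int :=
    l2.foldl
      (fun st x =>
        if PySem.Set.contains l1_set x then
          if PySem.Set.contains st.2.1 x then st
          else (st.1, PySem.Set.add st.2.1 x, st.2.2 + (total - st.1))
        else (st.1 + 1, st.2.1, st.2.2))
      (0, PySem.Set.empty, 0)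
  st.2.2

-- ===== PRECONDITION & SPEC =====
def Spec_count_elements_to_right (l1 : List Int) (l2 : List Int) (out : Int) : Prop := out = count_elements_to_right_alt l1 l2
instance (l1 : List Int) (l2 : List Int) (out : Int) : Decidable (Spec_count_elements_to_right l1 l2 out) := by unfold Spec_count_elements_to_right; infer_instance

-- ===== CLAIM (what is proved, stated in full; the proofs are below) =====
def Claim_equal_count_elements_to_right : Prop := ∀ (l1 : List Int) (l2 : List Int), Dom_count_elements_to_right l1 l2 → Spec_count_elements_to_right l1 l2 (count_elements_to_right l1 l2)

-- ===== LEMMAS AND PROOFS =====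

-- number of elements of ys not in S, as an Int
def pvCnt (S : List Int) (ys : List Int) : Int :=
  ((ys.countP (fun z => !PySem.Set.contains S z) : Nat) : Int)

-- non-S count strictly right of x's leftmost occurrence in ys (0 if x absent or x ∉ S)
def pvG (S : List Int) (x : Int) : List Int → Int
  | [] => 0
  | y :: ys => if PySem.Set.contains S y = true ∧ y = x then pvCnt S ys else pvG S x ys

lemma pvCnt_cons (S y : _) (ys : List Int) :
    pvCnt S (y :: ys) = (if PySem.Set.contains S y then 0 else 1) + pvCnt S ys := by
  cases h : PySem.Set.contains S y with
  | true =>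
    have hy : y ∈ S := (PySem.Set.contains_iff S y).mp h
    simp [pvCnt, List.countP_cons, hy]
  | false =>
    have hy : y ∉ S := fun hm => by rw [(PySem.Set.contains_iff S y).mpr hm] at h; cases h
    simp [pvCnt, List.countP_cons, hy]
    push_cast; ring

-- A's index loop over reversed(range(len(xs))) is the element loop over xs.reverse
lemma pv_A_rev (S : List Int) (xs : List Int) :
    ∀ init : PySem.Dict Int Int × Int,
    ((PySem.List.pyRange 0 (xs.length : Int) 1).reverse).foldl
      (fun st i =>
        if PySem.Set.contains S (PySem.List.pyGetD xs i 0) then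
          (st.1.insert (PySem.List.pyGetD xs i 0) st.2, st.2)
        else if !(PySem.Set.contains S (PySem.List.pyGetD xs i 0)) then
          (st.1, st.2 + 1)
        else st) init
    = xs.reverse.foldl
        (fun st v =>
          if PySem.Set.contains S v then (st.1.insert v st.2, st.2) else (st.1, st.2 + 1)) init := by
  induction xs using List.reverseRecOn with
  | nil => intro init; simp [PySem.List.pyRange]
  | append_singleton xs x ih =>
    intro init
    have hlen : ((xs ++ [x]).length : Int) = (xs.length : Int) + 1 := by simp
    rw [hlen, PySem.List.pyRange_one_succ_right (by positivity)]
    have hx : PySem.List.pyGetD (xs ++ [x]) (xs.length : Int) 0 = x := by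
      rw [PySem.List.pyGetD_eq_getElem _ _ (by positivity) (by simp)]
      simp
    have hcongr : ∀ (st : PySem.Dict Int Int × Int) (i : Int),
        i ∈ (PySem.List.pyRange 0 (xs.length : Int) 1).reverse →
        PySem.List.pyGetD (xs ++ [x]) i 0 = PySem.List.pyGetD xs i 0 := by
      intro st i hi
      rw [List.mem_reverse, PySem.List.mem_pyRange_one] at hi
      rw [PySem.List.pyGetD_eq_getElem _ _ hi.1 (by simp; omega),
          PySem.List.pyGetD_eq_getElem _ _ hi.1 (by omega)]
      rw [List.getElem_append_left]
    simp only [List.reverse_append, List.reverse_singleton, List.singleton_append, List.foldl_cons,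
      hx]
    rw [PySem.List.foldl_congr_mem _ _
      (fun st i =>
        if PySem.Set.contains S (PySem.List.pyGetD xs i 0) then
          (st.1.insert (PySem.List.pyGetD xs i 0) st.2, st.2)
        else if !(PySem.Set.contains S (PySem.List.pyGetD xs i 0)) then
          (st.1, st.2 + 1)
        else st) _
      (by intro st i hi; rw [hcongr st i hi])]
    rw [ih]
    cases h : PySem.Set.contains S x <;> simp [h]

-- the initial dict (all values 0) looks up to 0 everywhere
lemma pv_d0 (l : List Int) : ∀ (d : PySem.Dict Int Int), (∀ x, d.getD x 0 = 0) →
    ∀ x, (l.foldl (fun d y => d.insert y 0) d).getD x 0 = 0 := by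
  induction l with
  | nil => intro d hd x; exact hd x
  | cons y l ih =>
    intro d hd x
    refine ih _ (fun z => ?_) x
    rw [PySem.Dict.getD_insert]
    split <;> [rfl; exact hd z]

-- A's right-to-left loop: final count is pvCnt, final dict looks up to pvG
lemma pv_A_inv (S : List Int) (d : PySem.Dict Int Int) (hd : ∀ x, d.getD x 0 = 0) :
    ∀ l : List Int,
      ((l.foldr (fun v st =>
          if PySem.Set.contains S v then (st.1.insert v st.2, st.2) else (st.1, st.2 + 1))
        (d, (0 : Int))).2 = pvCnt S l)
      ∧ ∀ x, ((l.foldr (fun v st =>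
          if PySem.Set.contains S v then (st.1.insert v st.2, st.2) else (st.1, st.2 + 1))
        (d, (0 : Int))).1.getD x 0 = pvG S x l) := by
  intro l
  induction l with
  | nil => exact ⟨rfl, hd⟩
  | cons y l ih =>
    rw [List.foldr_cons]
    cases h : PySem.Set.contains S y with
    | false =>
      refine ⟨?_, fun x => ?_⟩
      · simp only [h, Bool.false_eq_true, if_false]
        rw [pvCnt_cons, h, if_neg (by simp)]
        have := ih.1; simp only [this]; ring
      · simp only [h, Bool.false_eq_true, if_false]
        rw [pvG, if_neg (by intro hc; rw [h] at hc; simp at hc), ih.2 x]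
    | true =>
      refine ⟨?_, fun x => ?_⟩
      · simp only [h, eq_self_iff_true, if_true]
        rw [pvCnt_cons, h, if_pos rfl, ih.1]; ring
      · simp only [h, eq_self_iff_true, if_true]
        rw [PySem.Dict.getD_insert, pvG]
        by_cases hxy : x = y
        · subst hxy; rw [if_pos rfl, if_pos ⟨h, rfl⟩, ih.1]
        · rw [if_neg hxy, if_neg (fun hc => hxy hc.2.symm), ih.2 x]

-- peeling the first fresh S-element out of the sum over the not-yet-seen part of S
lemma pv_peel (f g : Int → Int) (x : Int) :
    ∀ (S : List Int), S.Nodup → x ∈ S → ∀ (seen : PySem.Set Int), x ∉ seen →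
    (∀ y, y ≠ x → f y = g y) →
    ((S.filter (fun y => !PySem.Set.contains seen y)).map f).sum
      = f x + ((S.filter (fun y => !PySem.Set.contains (PySem.Set.add seen x) y)).map g).sum := by
  intro S
  induction S with
  | nil => intro _ hx; cases hx
  | cons a S ih =>
    intro hnd hx seen hseen hfg
    by_cases hax : a = x
    · subst hax
      have hnotS : a ∉ S := (List.nodup_cons.mp hnd).1
      have h1 : PySem.Set.contains seen a = false := by
        cases hc : PySem.Set.contains seen a with
        | false => rfl
        | true => exact absurd ((PySem.Set.contains_iff seen a).mp hc) hseen
      have h2 : PySem.Set.contains (PySem.Set.add seen a) a = true := by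
        rw [PySem.Set.contains_iff, PySem.Set.mem_add]; exact Or.inr rfl
      simp only [List.filter_cons, h1, h2, Bool.not_false, Bool.not_true, Bool.false_eq_true,
        if_true, if_false, List.map_cons, List.sum_cons]
      congr 1
      have hfi : S.filter (fun y => !PySem.Set.contains (PySem.Set.add seen a) y)
           = S.filter (fun y => !PySem.Set.contains seen y) := by
        apply List.filter_congr
        intro y hy
        have hyx : y ≠ a := fun h => hnotS (h ▸ hy)
        have : PySem.Set.contains (PySem.Set.add seen a) y = PySem.Set.contains seen y := by
          apply Bool.eq_iff_iff.mpr
          rw [PySem.Set.contains_iff, PySem.Set.contains_iff, PySem.Set.mem_add]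
          exact ⟨fun h => h.resolve_right hyx, Or.inl⟩
        rw [this]
      rw [hfi]
      apply congrArg List.sum
      apply List.map_congr_left
      intro y hy
      exact hfg y (fun h => hnotS (h ▸ (List.mem_filter.mp hy).1))
    · have hx' : x ∈ S := by
        cases hx with
        | head => exact absurd rfl hax
        | tail _ h => exact h
      have hca : PySem.Set.contains (PySem.Set.add seen x) a = PySem.Set.contains seen a := by
        apply Bool.eq_iff_iff.mpr
        rw [PySem.Set.contains_iff, PySem.Set.contains_iff, PySem.Set.mem_add]
        exact ⟨fun h => h.resolve_right hax, Or.inl⟩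
      have hrec := ih (List.nodup_cons.mp hnd).2 hx' seen hseen hfg
      simp only [List.filter_cons, hca]
      cases h : PySem.Set.contains seen a with
      | true => simpa [h] using hrec
      | false =>
        simp only [Bool.not_false, if_true, List.map_cons, List.sum_cons]
        rw [hrec, hfg a hax]; ring

-- B's forward loop invariant
lemma pv_B_inv (S : List Int) (hS : S.Nodup) (t : Int) :
    ∀ (l : List Int) (p res : Int) (seen : PySem.Set Int), p = t - pvCnt S l →
    (l.foldl (fun st x =>
        if PySem.Set.contains S x then
          if PySem.Set.contains st.2.1 x then st
          else (st.1, PySem.Set.add st.2.1 x, st.2.2 + (t - st.1))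
        else (st.1 + 1, st.2.1, st.2.2))
      (p, seen, res)).2.2
    = res + ((S.filter (fun y => !PySem.Set.contains seen y)).map (fun y => pvG S y l)).sum := by
  intro l
  induction l with
  | nil =>
    intro p res seen _
    simp [pvG]
  | cons x l ih =>
    intro p res seen hp
    rw [List.foldl_cons]
    cases h : PySem.Set.contains S x with
    | false =>
      simp only [h, Bool.false_eq_true, if_false]
      rw [ih (p + 1) res seen (by rw [hp, pvCnt_cons, h]; simp; ring)]
      congr 1
      apply congrArg List.sum
      apply List.map_congr_left
      intro y _
      rw [pvG, if_neg (by intro hc; rw [h] at hc; simp at hc)]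
    | true =>
      cases hseen : PySem.Set.contains seen x with
      | true =>
        simp only [h, hseen, if_true]
        rw [ih p res seen (by rw [hp, pvCnt_cons, h]; simp)]
        congr 1
        apply congrArg List.sum
        apply List.map_congr_left
        intro y hy
        have hyx : y ≠ x := by
          intro hh; subst hh
          have := (List.mem_filter.mp hy).2
          rw [hseen] at this; simp at this
        rw [pvG, if_neg (fun hc => hyx hc.2.symm)]
      | false =>
        simp only [h, hseen, if_true, Bool.false_eq_true, if_false]
        have hxS : x ∈ S := by
          have := h; rwa [PySem.Set.contains_iff] at this
        have hxseen : x ∉ seen := by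
          intro hmem
          rw [(PySem.Set.contains_iff seen x).mpr hmem] at hseen; cases hseen
        rw [ih p (res + (t - p)) (PySem.Set.add seen x)
              (by rw [hp, pvCnt_cons, h]; simp)]
        have ht : t - p = pvCnt S (x :: l) := by rw [hp]; ring
        rw [pv_peel (fun y => pvG S y (x :: l)) (fun y => pvG S y l) x S hS hxS seen hxseen
              (fun y hy => by show pvG S y (x :: l) = pvG S y l; rw [pvG, if_neg (fun hc => hy hc.2.symm)])]
        have hgx : pvG S x (x :: l) = pvCnt S l := by rw [pvG, if_pos ⟨h, rfl⟩]
        rw [hgx, ht, pvCnt_cons, h]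
        simp; ring

-- B's 'total' genexp-sum is pvCnt
lemma pv_total (S : List Int) (l : List Int) :
    ∀ acc : Int,
      l.foldl (fun acc x => if PySem.Set.contains S x then acc else acc + 1) acc
      = acc + pvCnt S l := by
  induction l with
  | nil => intro acc; simp [pvCnt]
  | cons x l ih =>
    intro acc
    rw [List.foldl_cons, pvCnt_cons]
    cases h : PySem.Set.contains S x with
    | false =>
      simp only [h, Bool.false_eq_true, if_false]
      rw [ih]; ring
    | true =>
      simp only [h, if_true]
      rw [ih]; ring

-- ===== VERDICT (by name: the statement is the Claim_ definition above) =====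
theorem count_elements_to_right_spec : Claim_equal_count_elements_to_right := by
  intro l1 l2 _
  unfold Spec_count_elements_to_right count_elements_to_right count_elements_to_right_alt
  simp only []
  set S : PySem.Set Int := PySem.Set.ofList l1 with hSdef
  -- A side
  rw [pv_A_rev S l2]
  rw [List.foldl_reverse]
  have hd0 : ∀ x, ((S : List Int).foldl (fun d x => d.insert x 0) (PySem.Dict.empty : PySem.Dict Int Int)).getD x 0 = 0 :=
    pv_d0 S (PySem.Dict.empty : PySem.Dict Int Int) (fun x => PySem.Dict.getD_empty x 0)
  have hA := pv_A_inv S _ hd0 l2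
  -- B side
  have hB := pv_B_inv S (PySem.Set.nodup_ofList l1) (pvCnt S l2) l2 0 0 PySem.Set.empty (by ring)
  rw [pv_total S l2 0]
  simp only [zero_add] at hB ⊢
  rw [hB]
  have hfilter : (S : List Int).filter (fun y => !PySem.Set.contains PySem.Set.empty y) = S := by
    apply List.filter_eq_self.mpr
    intro y _
    simp [PySem.Set.contains, PySem.Set.empty]
  rw [hfilter]
  apply congrArg List.sum
  apply List.map_congr_left
  intro x _
  have := hA.2 x
  convert this using 2
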